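-- pv_equiv track=rewrite | github.com/Tinkerforge/esp32-firmware | software/src/modules/iso15118/tools/evsim/run_evsim.py | parse_energy_transfer_modes
-- ===== SOURCE A (Python) =====
-- from typing import List, Optional, Tuple
--
-- ENERGY_TRANSFER_MODES = {
--     "dc_core": "DC_core",
--     "dc_extended": "DC_extended",
--     "ac_single": "AC_single_phase_core",
--     "ac_three": "AC_three_phase_core",
-- }
--
-- ENERGY_TRANSFER_SHORTCUTS = {
--     "ac": ["ac_single", "ac_three"],
--     "dc": ["dc_core", "dc_extended"],
--     "all": ["ac_single", "ac_three", "dc_core", "dc_extended"],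
-- }
--
-- def parse_energy_transfer_modes(transfer_str: str) -> List[str]:
--     """
--     Parse energy transfer mode string into list of mode names.
--     Supports comma-separated values and shortcuts.
--
--     Examples:
--         "ac_single" -> ["AC_single_phase_core"]
--         "dc_extended" -> ["DC_extended"]
--         "ac_single,dc_extended" -> ["AC_single_phase_core", "DC_extended"]
--         "ac" -> ["AC_single_phase_core", "AC_three_phase_core"]
--         "dc" -> ["DC_core", "DC_extended"]
--         "all" -> all modes
--     """
--     modes = []
--     parts = [p.strip().lower() for p in transfer_str.split(",")]
--
--     for part in parts:
--         if part in ENERGY_TRANSFER_SHORTCUTS: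
--             # Expand shortcut
--             for m in ENERGY_TRANSFER_SHORTCUTS[part]:
--                 if ENERGY_TRANSFER_MODES[m] not in modes:
--                     modes.append(ENERGY_TRANSFER_MODES[m])
--         elif part in ENERGY_TRANSFER_MODES:
--             if ENERGY_TRANSFER_MODES[part] not in modes:
--                 modes.append(ENERGY_TRANSFER_MODES[part])
--         else:
--             raise ValueError(f"Unknown energy transfer mode: {part}")
--
--     return modes
-- ===== SOURCE B (Python) =====
-- from typing import List
--
-- ENERGY_TRANSFER_MODES = {
--     "dc_core": "DC_core",
--     "dc_extended": "DC_extended",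
--     "ac_single": "AC_single_phase_core",
--     "ac_three": "AC_three_phase_core",
-- }
--
-- ENERGY_TRANSFER_SHORTCUTS = {
--     "ac": ["ac_single", "ac_three"],
--     "dc": ["dc_core", "dc_extended"],
--     "all": ["ac_single", "ac_three", "dc_core", "dc_extended"],
-- }
--
-- def parse_energy_transfer_modes(transfer_str: str) -> List[str]:
--     parts = [p.strip().lower() for p in transfer_str.split(",")]
--     # Validate every part up front (errors fire in order on the first bad part).
--     for part in parts:
--         if part not in ENERGY_TRANSFER_SHORTCUTS and part not in ENERGY_TRANSFER_MODES:
--             raise ValueError(f"Unknown energy transfer mode: {part}")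
--     # Expand shortcuts into one flat key sequence.
--     expanded = [k for part in parts for k in ENERGY_TRANSFER_SHORTCUTS.get(part, [part])]
--     # Select the requested modes in table order, then order them by first appearance.
--     present = [k for k in ENERGY_TRANSFER_MODES if k in expanded]
--     present.sort(key=expanded.index)
--     return [ENERGY_TRANSFER_MODES[k] for k in present]
-- ===== Notes on version B (the rewrite author's own statement) =====
-- stated objective: alternative
-- what changed: Replaces A's single accumulation loop with its inner membership scan over the accumulated result by a staged pipeline: validate all parts, flatten shortcuts into one key sequence, select the present mode keys from the fixed table, sort them by index of first appearance, then translate to names.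
import Mathlib
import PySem

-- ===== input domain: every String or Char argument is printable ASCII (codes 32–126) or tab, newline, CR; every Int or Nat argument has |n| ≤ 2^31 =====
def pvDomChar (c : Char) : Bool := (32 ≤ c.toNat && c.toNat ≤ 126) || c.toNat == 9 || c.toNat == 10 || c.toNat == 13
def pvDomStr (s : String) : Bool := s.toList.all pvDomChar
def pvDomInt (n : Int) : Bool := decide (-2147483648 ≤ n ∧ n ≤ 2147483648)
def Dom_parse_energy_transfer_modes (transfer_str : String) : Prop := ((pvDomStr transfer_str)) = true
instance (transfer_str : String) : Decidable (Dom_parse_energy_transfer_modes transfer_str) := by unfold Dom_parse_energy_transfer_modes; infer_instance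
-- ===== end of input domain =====

-- B replaces A's accumulation loop (with its inner membership scan over the accumulated result) by a staged
-- pipeline: validate all parts, flatten shortcuts into one key sequence, filter the fixed mode
-- table for the present keys, sort them by index of first appearance, then translate to names;
-- objective: alternative, same observable behaviour.

-- ===== PORT A =====
def ENERGY_TRANSFER_MODES : PySem.Dict String String :=
  PySem.Dict.ofList [("dc_core", "DC_core"), ("dc_extended", "DC_extended"),
    ("ac_single", "AC_single_phase_core"), ("ac_three", "AC_three_phase_core")]

def ENERGY_TRANSFER_SHORTCUTS : PySem.Dict String (List String) :=
  PySem.Dict.ofList [("ac", ["ac_single", "ac_three"]), ("dc", ["dc_core", "dc_extended"]),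
    ("all", ["ac_single", "ac_three", "dc_core", "dc_extended"])]

-- [p.strip().lower() for p in transfer_str.split(",")] (shared first line of both Pythons)
def pvParts (transfer_str : String) : List String :=
  ((PySem.Str.split? transfer_str ",").getD []).map (fun p => PySem.Str.lower (PySem.Str.strip p))

def parse_energy_transfer_modes (transfer_str : String) : List String :=
  (pvParts transfer_str).foldl (fun modes part =>
    if ENERGY_TRANSFER_SHORTCUTS.contains part then
      -- Expand shortcut
      (ENERGY_TRANSFER_SHORTCUTS.getD part []).foldl (fun modes m =>
        if modes.contains (ENERGY_TRANSFER_MODES.getD m "") then modes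
        else modes ++ [ENERGY_TRANSFER_MODES.getD m ""]) modes
    else if ENERGY_TRANSFER_MODES.contains part then
      if modes.contains (ENERGY_TRANSFER_MODES.getD part "") then modes
      else modes ++ [ENERGY_TRANSFER_MODES.getD part ""]
    else
      modes   -- Python raises ValueError here; excluded by Pre_
    ) []

-- ===== PORT B =====
def parse_energy_transfer_modes_alt (transfer_str : String) : List String :=
  let parts := pvParts transfer_str
  -- B's validation loop raises ValueError on the first invalid part (excluded by Pre_);
  -- on admitted input it has no effect, so it leaves no trace in the port
  -- expanded = [k for part in parts for k in ENERGY_TRANSFER_SHORTCUTS.get(part, [part])]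
  let expanded := parts.flatMap (fun part => ENERGY_TRANSFER_SHORTCUTS.getD part [part])
  -- present = [k for k in ENERGY_TRANSFER_MODES if k in expanded]
  let present := ENERGY_TRANSFER_MODES.keys.filter (fun k => expanded.contains k)
  -- present.sort(key=expanded.index)  (expanded.index is only called on members of expanded,
  -- so the total form (index? …).getD 0 is exact there)
  let present := PySem.List.sorted present (fun k => (PySem.List.index? expanded k).getD 0) false
  present.map (fun k => ENERGY_TRANSFER_MODES.getD k "")

-- ===== PRECONDITION & SPEC =====
-- Pre_ excludes exactly the inputs on which Python A raises ValueError: some normalized part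
-- is neither a shortcut nor a mode key.
def Pre_parse_energy_transfer_modes (transfer_str : String) : Prop :=
  ∀ p ∈ pvParts transfer_str,
    ENERGY_TRANSFER_SHORTCUTS.contains p = true ∨ ENERGY_TRANSFER_MODES.contains p = true
instance (transfer_str : String) : Decidable (Pre_parse_energy_transfer_modes transfer_str) := by
  unfold Pre_parse_energy_transfer_modes; infer_instance

def pvWitness_parse_energy_transfer_modes : String := "ac_single, DC"

def Spec_parse_energy_transfer_modes (transfer_str : String) (out : List String) : Prop :=
  out = parse_energy_transfer_modes_alt transfer_str
instance (transfer_str : String) (out : List String) :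
    Decidable (Spec_parse_energy_transfer_modes transfer_str out) := by
  unfold Spec_parse_energy_transfer_modes; infer_instance

-- ===== CLAIM (what is proved, stated in full; the proofs are below) =====
def Claim_equal_parse_energy_transfer_modes : Prop :=
  ∀ (transfer_str : String), Dom_parse_energy_transfer_modes transfer_str →
    Pre_parse_energy_transfer_modes transfer_str →
    Spec_parse_energy_transfer_modes transfer_str (parse_energy_transfer_modes transfer_str)

-- ===== LEMMAS AND PROOFS =====

def pvKeys : List String := ["dc_core", "dc_extended", "ac_single", "ac_three"]
def pvName (k : String) : String := ENERGY_TRANSFER_MODES.getD k ""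
-- mode keys contributed by one VALID normalized part (same expression as B's expansion step)
def pvKeyOf (part : String) : List String := ENERGY_TRANSFER_SHORTCUTS.getD part [part]
-- B's sort key: index of first occurrence in L (for members of L)
def gkey (L : List String) (v : String) : Nat := (PySem.List.index? L v).getD 0

lemma pvSC_cases (p : String) (h : ENERGY_TRANSFER_SHORTCUTS.contains p = true) :
    p = "ac" ∨ p = "dc" ∨ p = "all" := by
  simp [ENERGY_TRANSFER_SHORTCUTS, PySem.Dict.contains, PySem.Dict.ofList, PySem.Dict.update,
    PySem.Dict.empty, PySem.Dict.insert] at h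
  tauto

lemma pvM_cases (p : String) (h : ENERGY_TRANSFER_MODES.contains p = true) :
    p ∈ pvKeys := by
  simp [ENERGY_TRANSFER_MODES, PySem.Dict.contains, PySem.Dict.ofList, PySem.Dict.update,
    PySem.Dict.empty, PySem.Dict.insert] at h
  simp [pvKeys]
  tauto

-- every key a valid part expands to is one of the four mode keys
lemma pvValid_subset (part : String)
    (h : ENERGY_TRANSFER_SHORTCUTS.contains part = true ∨ ENERGY_TRANSFER_MODES.contains part = true) :
    ∀ k ∈ pvKeyOf part, k ∈ pvKeys := by
  rcases h with h | h
  · rcases pvSC_cases part h with rfl | rfl | rfl <;> decide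
  · have hk := pvM_cases part h
    intro k hkk
    have hone : pvKeyOf part = [part] := by
      fin_cases hk <;> decide
    rw [hone, List.mem_singleton] at hkk
    rw [hkk]; exact hk

-- A's loop body on a valid part is a set-style add of the names of pvKeyOf part
lemma pvA_step (modes : List String) (part : String)
    (h : ENERGY_TRANSFER_SHORTCUTS.contains part = true ∨ ENERGY_TRANSFER_MODES.contains part = true) :
    (if ENERGY_TRANSFER_SHORTCUTS.contains part then
      (ENERGY_TRANSFER_SHORTCUTS.getD part []).foldl (fun modes m =>
        if modes.contains (ENERGY_TRANSFER_MODES.getD m "") then modes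
        else modes ++ [ENERGY_TRANSFER_MODES.getD m ""]) modes
    else if ENERGY_TRANSFER_MODES.contains part then
      if modes.contains (ENERGY_TRANSFER_MODES.getD part "") then modes
      else modes ++ [ENERGY_TRANSFER_MODES.getD part ""]
    else modes) = ((pvKeyOf part).map pvName).foldl PySem.Set.add modes := by
  rcases h with h | h
  · rcases pvSC_cases part h with rfl | rfl | rfl <;> rfl
  · have hk := pvM_cases part h
    fin_cases hk <;> rfl

lemma pvFoldl_flat (parts : List String) (acc : List String) :
    parts.foldl (fun modes part => ((pvKeyOf part).map pvName).foldl PySem.Set.add modes) acc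
      = ((parts.flatMap pvKeyOf).map pvName).foldl PySem.Set.add acc := by
  induction parts generalizing acc with
  | nil => rfl
  | cons p ps ih =>
    simp only [List.foldl_cons, List.flatMap_cons, List.map_append, List.foldl_append, ih]

lemma pvName_inj : ∀ a ∈ pvKeys, ∀ b ∈ pvKeys, pvName a = pvName b → a = b := by decide

-- set-style accumulation commutes with an injective translation
lemma pvDedupMap : ∀ (xs acc : List String), (∀ a ∈ acc, a ∈ pvKeys) → (∀ a ∈ xs, a ∈ pvKeys) →
    (xs.map pvName).foldl PySem.Set.add (acc.map pvName) = (xs.foldl PySem.Set.add acc).map pvName := by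
  intro xs
  induction xs with
  | nil => intro acc _ _; rfl
  | cons x xs ih =>
    intro acc hacc hxs
    have hx : x ∈ pvKeys := hxs x (by simp)
    have hstep : PySem.Set.add (acc.map pvName) (pvName x) = (PySem.Set.add acc x).map pvName := by
      by_cases hmem : x ∈ acc
      · have hex : ∃ a ∈ acc, pvName a = pvName x := ⟨x, hmem, rfl⟩
        simp [PySem.Set.add, hmem, hex]
      · have hne : ¬ ∃ a ∈ acc, pvName a = pvName x := by
          rintro ⟨a, ha, hval⟩
          exact hmem ((pvName_inj a (hacc a ha) x hx hval) ▸ ha)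
        simp [PySem.Set.add, hmem, hne]
    simp only [List.map_cons, List.foldl_cons, hstep]
    exact ih (PySem.Set.add acc x)
      (by intro a ha; rw [PySem.Set.mem_add] at ha; rcases ha with h | rfl; exacts [hacc a h, hx])
      (fun a ha => hxs a (by simp [ha]))

lemma gk_lt (l : List String) (v : String) (h : v ∈ l) : gkey l v < l.length := by
  have hs : (PySem.List.index? l v).isSome := (PySem.List.index?_isSome_iff l v).2 h
  obtain ⟨k, hk⟩ := Option.isSome_iff_exists.1 hs
  obtain ⟨hlt, -, -⟩ := PySem.List.getElem_of_index?_eq_some hk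
  unfold gkey
  rw [hk]
  exact hlt

lemma gk_append_mem (l t : List String) (v : String) (h : v ∈ l) :
    gkey (l ++ t) v = gkey l v := by
  unfold gkey
  rw [PySem.List.index?_append_of_mem t h]

lemma gk_append_not (l t : List String) (v : String) (hnl : v ∉ l) (ht : v ∈ t) :
    l.length ≤ gkey (l ++ t) v := by
  have hs : (PySem.List.index? (l ++ t) v).isSome :=
    (PySem.List.index?_isSome_iff _ v).2 (by simp [ht])
  obtain ⟨k, hk⟩ := Option.isSome_iff_exists.1 hs
  obtain ⟨hlt, he, -⟩ := PySem.List.getElem_of_index?_eq_some hk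
  unfold gkey
  rw [hk]
  simp only [Option.getD_some]
  by_contra hc
  have hkl : k < l.length := by omega
  have hgl : (l ++ t)[k] = l[k]'hkl := List.getElem_append_left hkl
  exact hnl (he ▸ hgl ▸ List.getElem_mem _)

-- set-style accumulation over L lists L's distinct elements in order of first occurrence:
-- the result is strictly increasing under the first-index key
lemma pvPW (L : List String) : ∀ (xs pre acc : List String), L = pre ++ xs →
    (∀ a, a ∈ acc ↔ a ∈ pre) →
    acc.Pairwise (fun a b => gkey L a < gkey L b) →
    (xs.foldl PySem.Set.add acc).Pairwise (fun a b => gkey L a < gkey L b) := by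
  intro xs
  induction xs with
  | nil => intro pre acc _ _ hp; simpa using hp
  | cons x xs ih =>
    intro pre acc hL hm hp
    rw [List.foldl_cons]
    refine ih (pre ++ [x]) (PySem.Set.add acc x) (by rw [hL, List.append_assoc]; rfl) ?_ ?_
    · intro a
      rw [PySem.Set.mem_add]
      simp [hm a]
    · by_cases hx : PySem.Set.contains acc x = true
      · have hmem : x ∈ acc := by simpa [PySem.Set.contains] using hx
        simpa [PySem.Set.add, hx, hmem] using hp
      · have hxa : x ∉ acc := by simpa [PySem.Set.contains] using hx
        have hxp : x ∉ pre := fun h => hxa ((hm x).2 h)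
        rw [PySem.Set.add, if_neg hx, List.pairwise_append]
        refine ⟨hp, by simp, ?_⟩
        intro a ha b hb
        have hb' : b = x := by simpa using hb
        rw [hb']
        have h1 : gkey L a < pre.length := by
          rw [hL, gk_append_mem pre _ a ((hm a).1 ha)]
          exact gk_lt pre a ((hm a).1 ha)
        have h2 : pre.length ≤ gkey L x := by
          rw [hL]; exact gk_append_not pre _ x hxp (by simp)
        omega

-- ===== VERDICT (by name: the statement is the Claim_ definition above) =====
theorem parse_energy_transfer_modes_spec : Claim_equal_parse_energy_transfer_modes := by
  intro t _ hpre
  unfold Spec_parse_energy_transfer_modes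
  set E : List String := (pvParts t).flatMap pvKeyOf with hE
  have hsubset : ∀ a ∈ E, a ∈ pvKeys := by
    intro a ha
    rw [hE, List.mem_flatMap] at ha
    obtain ⟨p, hp, hap⟩ := ha
    exact pvValid_subset p (hpre p hp) a hap
  -- A-side: the loop computes the set-style accumulation of the translated expansion
  have hA : parse_energy_transfer_modes t = (E.map pvName).foldl PySem.Set.add [] := by
    unfold parse_energy_transfer_modes
    refine Eq.trans ?_ (pvFoldl_flat (pvParts t) [])
    apply PySem.List.foldl_congr_mem
    intro acc p hp
    exact pvA_step acc p (hpre p hp)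
  have hpw : (E.foldl PySem.Set.add []).Pairwise (fun a b => gkey E a < gkey E b) :=
    pvPW E E [] [] rfl (by simp) (by simp)
  have hnodup : (E.foldl PySem.Set.add []).Nodup := by
    rw [← PySem.Set.ofList_eq_foldl]
    exact PySem.Set.nodup_ofList E
  have hkeys : ENERGY_TRANSFER_MODES.keys = pvKeys := by decide
  have hperm : (E.foldl PySem.Set.add []).Perm (ENERGY_TRANSFER_MODES.keys.filter (fun k => E.contains k)) := by
    rw [hkeys]
    refine (List.perm_ext_iff_of_nodup hnodup ((by decide : pvKeys.Nodup).filter _)).2 ?_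
    intro a
    rw [← PySem.Set.ofList_eq_foldl, PySem.Set.mem_ofList, List.mem_filter]
    constructor
    · intro ha; exact ⟨hsubset a ha, by simpa using ha⟩
    · rintro ⟨-, ha⟩; simpa using ha
  have hsort : PySem.List.sorted (ENERGY_TRANSFER_MODES.keys.filter (fun k => E.contains k)) (fun k => gkey E k) false
      = E.foldl PySem.Set.add [] :=
    PySem.List.sorted_eq_of_perm_of_pairwise_lt _ _ _ hperm hpw
  -- B-side: unfold the let-chain (everything is the same term up to defeq)
  show parse_energy_transfer_modes t
      = (PySem.List.sorted (ENERGY_TRANSFER_MODES.keys.filter (fun k => E.contains k)) (fun k => gkey E k) false).map pvName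
  rw [hsort, hA, ← pvDedupMap E [] (by simp) hsubset]
  rfl
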